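-- pv_equiv track=rewrite | github.com/DMDevStuff/HackerRank---Sherlock-and-Pairs---Python-3.10-write-up | HackerRank - Sherlock and Pairs - Python 3.10 write up.py | solve
-- ===== SOURCE A (Python) =====
-- def solve(a):
--
--     index_table = dict()
--     total_number_of_pairs = 0
--
--     for index in range(len(a)):
--
--         try:
--             index_table[a[index]].append(index)
--
--         except:
--             index_table[a[index]] = list()
--             index_table[a[index]].append(index)
--
--     for key in index_table:
--
--         n = len(index_table[key])
--
--         if n > 1:
--
--             total_number_of_pairs += (n * (n - 1))
--
--     return total_number_of_pairs
-- ===== SOURCE B (Python) =====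
-- def solve(a):
--     seen = {}
--     total = 0
--     for x in a:
--         total += 2 * seen.get(x, 0)
--         seen[x] = seen.get(x, 0) + 1
--     return total
-- ===== Notes on version B (the rewrite author's own statement) =====
-- stated objective: faster
-- what changed: Replaces A's two-phase scheme (build a dict of per-value index lists, then sum n*(n-1) over the groups) with one online pass keeping only a running count per value and adding 2*seen[x] as each element arrives; no index lists are stored and no second loop over the groups runs.
import Mathlib
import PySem

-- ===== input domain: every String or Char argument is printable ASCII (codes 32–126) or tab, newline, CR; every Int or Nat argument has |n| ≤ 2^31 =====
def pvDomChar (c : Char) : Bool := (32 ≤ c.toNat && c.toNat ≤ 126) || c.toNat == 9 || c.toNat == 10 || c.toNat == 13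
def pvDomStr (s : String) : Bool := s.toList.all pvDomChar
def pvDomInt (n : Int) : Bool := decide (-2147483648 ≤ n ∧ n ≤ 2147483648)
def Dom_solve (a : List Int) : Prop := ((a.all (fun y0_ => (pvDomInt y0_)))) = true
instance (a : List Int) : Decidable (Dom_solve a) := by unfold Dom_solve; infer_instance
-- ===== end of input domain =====

-- B replaces A's two-phase dict-of-index-lists scheme with one online pass keeping a
-- running count per value and adding 2*seen[x] per element (measured faster, constant factor).

-- ===== PORT A =====
-- for index in range(len(a)): a[index] — every index is in range, so this is exactly a
-- fold over enumerate(a); the try/append/except/create-then-append body is exactly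
-- d.modify (a[index]) [] (· ++ [index])  (d[k] = d.get(k, []) + [index]).
def solve (a : List Int) : Int :=
  let indexTable :=
    (PySem.List.enumerate a 0).foldl
      (fun d p => d.modify p.2 [] (· ++ [p.1]))
      (PySem.Dict.empty : PySem.Dict Int (List Int))
  indexTable.keys.foldl
    (fun total key =>
      let n : Int := ((indexTable.getD key []).length : Int)
      if n > 1 then total + n * (n - 1) else total)
    0

-- ===== PORT B =====
def solve_alt (a : List Int) : Int :=
  (a.foldl
    (fun st x => (st.1.insert x (st.1.getD x 0 + 1), st.2 + 2 * st.1.getD x 0))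
    ((PySem.Dict.empty : PySem.Dict Int Int), (0 : Int))).2

-- ===== PRECONDITION & SPEC =====
def Spec_solve (a : List Int) (out : Int) : Prop := out = solve_alt a
instance (a : List Int) (out : Int) : Decidable (Spec_solve a out) := by unfold Spec_solve; infer_instance

-- ===== CLAIM (what is proved, stated in full; the proofs are below) =====
def Claim_equal_solve : Prop := ∀ (a : List Int), Dom_solve a → Spec_solve a (solve a)

-- ===== LEMMAS AND PROOFS =====

-- closed form both ports are proved equal to: Σ over distinct values of n*(n-1)
def pairSum (a : List Int) : Int :=
  ((PySem.Set.ofList a).map (fun k => (a.count k : Int) * ((a.count k : Int) - 1))).sum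

lemma tbl_getD (l : List (Int × Int)) (d : PySem.Dict Int (List Int)) (c : Int) :
    (l.foldl (fun d p => d.modify p.2 [] (· ++ [p.1])) d).getD c []
      = d.getD c [] ++ (l.filter (fun p => p.2 == c)).map (·.1) := by
  induction l generalizing d with
  | nil => simp
  | cons p l ih =>
      simp only [List.foldl_cons, ih, PySem.Dict.getD_modify, List.filter_cons]
      by_cases h : c = p.2
      · simp [h]
      · simp [h, Ne.symm h]

lemma filter_enumerate_count (a : List Int) (s : Int) (c : Int) :
    ((PySem.List.enumerate a s).filter (fun p => p.2 == c)).length = a.count c := by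
  induction a generalizing s with
  | nil => simp [PySem.List.enumerate_nil]
  | cons x a ih =>
      simp only [PySem.List.enumerate_cons, List.filter_cons, List.count_cons]
      by_cases h : x = c
      · simp [h, ih]
      · simp [h, ih]

lemma solve_eq_pairSum (a : List Int) : solve a = pairSum a := by
  unfold solve pairSum
  have hlen : ∀ c : Int,
      ((((PySem.List.enumerate a 0).foldl (fun d p => d.modify p.2 [] (· ++ [p.1]))
        (PySem.Dict.empty : PySem.Dict Int (List Int))).getD c []).length : Int) = (a.count c : Int) := by
    intro c
    rw [tbl_getD]
    simp [filter_enumerate_count]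
  have hkeys :
      ((PySem.List.enumerate a 0).foldl (fun d p => d.modify p.2 [] (· ++ [p.1]))
        (PySem.Dict.empty : PySem.Dict Int (List Int))).keys = PySem.Set.ofList a := by
    rw [PySem.Dict.keys_foldl_modify_key]
    simp [PySem.List.map_snd_enumerate, PySem.Set.update_nil_left]
  simp only [hkeys]
  trans (List.foldl (fun t k => t + (a.count k : Int) * ((a.count k : Int) - 1)) 0
      (PySem.Set.ofList a))
  · apply PySem.List.foldl_congr_mem'
    intro k hk acc
    simp only [hlen k]
    have hmem : k ∈ a := (PySem.Set.mem_ofList _ _).1 hk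
    have hpos : 1 ≤ a.count k := List.count_pos_iff.2 hmem
    split_ifs with h
    · rfl
    · have h1 : a.count k = 1 := by omega
      simp [h1]
  · rw [PySem.List.foldl_add]
    simp

lemma pairSum_append (a : List Int) (x : Int) :
    pairSum (a ++ [x]) = pairSum a + 2 * (a.count x : Int) := by
  unfold pairSum
  rw [PySem.Set.ofList_append_singleton]
  by_cases hx : x ∈ a
  · have hadd : PySem.Set.add (PySem.Set.ofList a) x = PySem.Set.ofList a := by
      simp [PySem.Set.add, PySem.Set.contains, PySem.Set.mem_ofList, hx]
    rw [hadd]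
    have hxs : x ∈ PySem.Set.ofList a := (PySem.Set.mem_ofList _ _).2 hx
    have hnd : (PySem.Set.ofList a).Nodup := PySem.Set.nodup_ofList a
    have hperm := List.perm_cons_erase hxs
    rw [List.Perm.sum_eq (hperm.map _), List.Perm.sum_eq (hperm.map _)]
    simp only [List.map_cons, List.sum_cons]
    have herase : ∀ k ∈ (PySem.Set.ofList a).erase x,
        ((a ++ [x]).count k : Int) = (a.count k : Int) := by
      intro k hk
      have hne : k ≠ x := ((List.Nodup.mem_erase_iff hnd).1 hk).1
      simp [List.count_append, hne.symm]
    have hmape : ((PySem.Set.ofList a).erase x).map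
          (fun k => (((a ++ [x]).count k : Int)) * (((a ++ [x]).count k : Int) - 1))
        = ((PySem.Set.ofList a).erase x).map
          (fun k => ((a.count k : Int)) * ((a.count k : Int) - 1)) := by
      apply List.map_congr_left
      intro k hk
      rw [herase k hk]
    rw [hmape]
    have hcx : (((a ++ [x]).count x : Int)) = (a.count x : Int) + 1 := by
      simp [List.count_append]
    rw [hcx]
    ring
  · have hadd : PySem.Set.add (PySem.Set.ofList a) x = PySem.Set.ofList a ++ [x] := by
      simp [PySem.Set.add, PySem.Set.contains, PySem.Set.mem_ofList, hx]
    rw [hadd, List.map_append, List.sum_append]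
    have hx0 : a.count x = 0 := List.count_eq_zero.2 hx
    have hmape : (PySem.Set.ofList a).map
          (fun k => (((a ++ [x]).count k : Int)) * (((a ++ [x]).count k : Int) - 1))
        = (PySem.Set.ofList a).map
          (fun k => ((a.count k : Int)) * ((a.count k : Int) - 1)) := by
      apply List.map_congr_left
      intro k hk
      have hne : k ≠ x := fun h => hx (h ▸ (PySem.Set.mem_ofList _ _).1 hk)
      simp [List.count_append, hne.symm]
    rw [hmape]
    simp [List.count_append, List.count_singleton', hx0]

lemma alt_fst (l : List Int) (c : PySem.Dict Int Int) (t : Int) :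
    (l.foldl (fun st x => (st.1.insert x (st.1.getD x 0 + 1), st.2 + 2 * st.1.getD x 0)) (c, t)).1
      = l.foldl (fun d x => d.insert x (d.getD x 0 + 1)) c := by
  induction l generalizing c t with
  | nil => rfl
  | cons y l ih => simpa using ih _ _

lemma alt_append (a : List Int) (x : Int) :
    solve_alt (a ++ [x]) = solve_alt a + 2 * (a.count x : Int) := by
  unfold solve_alt
  rw [List.foldl_append]
  simp only [List.foldl_cons, List.foldl_nil]
  rw [alt_fst, PySem.Dict.foldl_insert_getD_add_one_eq_counter, PySem.Dict.getD_counter]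

lemma alt_eq_pairSum (a : List Int) : solve_alt a = pairSum a := by
  induction a using List.reverseRecOn with
  | nil => rfl
  | append_singleton a x ih => rw [alt_append, pairSum_append, ih]

-- ===== VERDICT (by name: the statement is the Claim_ definition above) =====
theorem solve_spec : Claim_equal_solve := by
  intro a _
  unfold Spec_solve
  rw [solve_eq_pairSum, alt_eq_pairSum]
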